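-- pv_equiv track=rewrite | github.com/lromero74/ZenithGrid | backend/app/services/domain_blacklist_service.py | _domain_variants
-- ===== SOURCE A (Python) =====
-- TWO_PART_TLDS = frozenset({
--     "co.uk", "org.uk", "ac.uk", "gov.uk", "me.uk", "net.uk",
--     "co.jp", "or.jp", "ne.jp", "ac.jp", "go.jp",
--     "com.au", "net.au", "org.au", "edu.au", "gov.au",
--     "co.nz", "net.nz", "org.nz",
--     "co.in", "net.in", "org.in", "gen.in", "firm.in", "ind.in",
--     "co.za", "org.za", "web.za",
--     "com.br", "net.br", "org.br",
--     "com.cn", "net.cn", "org.cn",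
--     "com.mx", "net.mx", "org.mx",
--     "co.kr", "or.kr", "ne.kr",
--     "com.tw", "net.tw", "org.tw",
--     "co.il", "org.il", "net.il",
--     "com.sg", "net.sg", "org.sg",
--     "com.hk", "net.hk", "org.hk",
--     "co.th", "or.th", "in.th",
--     "com.my", "net.my", "org.my",
--     "com.ph", "net.ph", "org.ph",
--     "com.ar", "net.ar", "org.ar",
--     "com.co", "net.co", "org.co",
-- })
--
-- def _domain_variants(domain: str) -> list:
--     """Walk parent domains for matching.
--
--     Example: sub.evil.com -> [sub.evil.com, evil.com]
--     Stops before bare TLDs or two-part TLDs (e.g., co.uk).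
--     """
--     parts = domain.split(".")
--     variants = []
--
--     for i in range(len(parts)):
--         candidate = ".".join(parts[i:])
--         remaining = parts[i:]
--
--         # Don't check bare TLDs (e.g., "com")
--         if len(remaining) <= 1:
--             break
--
--         # Don't check two-part TLDs (e.g., "co.uk")
--         if candidate in TWO_PART_TLDS:
--             break
--
--         variants.append(candidate)
--
--     return variants
-- ===== SOURCE B (Python) =====
-- TWO_PART_TLDS = frozenset({
--     "co.uk", "org.uk", "ac.uk", "gov.uk", "me.uk", "net.uk",
--     "co.jp", "or.jp", "ne.jp", "ac.jp", "go.jp",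
--     "com.au", "net.au", "org.au", "edu.au", "gov.au",
--     "co.nz", "net.nz", "org.nz",
--     "co.in", "net.in", "org.in", "gen.in", "firm.in", "ind.in",
--     "co.za", "org.za", "web.za",
--     "com.br", "net.br", "org.br",
--     "com.cn", "net.cn", "org.cn",
--     "com.mx", "net.mx", "org.mx",
--     "co.kr", "or.kr", "ne.kr",
--     "com.tw", "net.tw", "org.tw",
--     "co.il", "org.il", "net.il",
--     "com.sg", "net.sg", "org.sg",
--     "com.hk", "net.hk", "org.hk",
--     "co.th", "or.th", "in.th",
--     "com.my", "net.my", "org.my",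
--     "com.ph", "net.ph", "org.ph",
--     "com.ar", "net.ar", "org.ar",
--     "com.co", "net.co", "org.co",
-- })
--
-- def _domain_variants(domain: str) -> list:
--     """Build every parent-domain suffix once, right to left, by extending an
--     accumulator string (no repeated join over slices); then drop the bare TLD
--     (and the two-part TLD, which can only be the second-shortest suffix, since
--     table entries contain exactly one dot) and reverse to longest-first."""
--     parts = domain.split(".")
--     suffixes = []          # shortest-first: last label, last two labels, ...
--     acc = None
--     for p in reversed(parts):
--         acc = p if acc is None else p + "." + acc
--         suffixes.append(acc)
--     keep = 2 if len(suffixes) >= 2 and suffixes[1] in TWO_PART_TLDS else 1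
--     return suffixes[keep:][::-1]
-- ===== Notes on version B (the rewrite author's own statement) =====
-- stated objective: alternative
-- what changed: Replaces the scan-and-break loop that re-joins a slice at every index by a single right-to-left pass extending an accumulator string to build all suffixes shortest-first, then a closed-form cutoff (only the 1-label suffix, and the 2-label suffix when it is a two-part TLD, are dropped, since TLD-table entries contain exactly one dot) and a reversal to longest-first.
import Mathlib
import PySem

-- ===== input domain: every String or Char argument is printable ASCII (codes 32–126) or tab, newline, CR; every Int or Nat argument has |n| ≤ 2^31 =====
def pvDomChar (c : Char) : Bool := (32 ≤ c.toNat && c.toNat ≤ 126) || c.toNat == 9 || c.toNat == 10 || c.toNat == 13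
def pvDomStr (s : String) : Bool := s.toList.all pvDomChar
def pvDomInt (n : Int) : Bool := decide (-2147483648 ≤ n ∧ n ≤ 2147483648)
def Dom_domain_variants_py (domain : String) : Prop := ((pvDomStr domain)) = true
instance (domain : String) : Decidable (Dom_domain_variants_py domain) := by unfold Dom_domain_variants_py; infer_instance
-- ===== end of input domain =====

-- B replaces A's scan-and-break loop (which re-joins a slice at every index) by one
-- right-to-left pass extending an accumulator string to build all suffixes shortest-first,
-- then a closed-form cutoff and a reversal; objective: alternative. A never raises.


-- ===== PORT A =====
-- the module constant TWO_PART_TLDS (a frozenset of string literals; used only for membership)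
def twoPartTlds : List String :=
  ["co.uk", "org.uk", "ac.uk", "gov.uk", "me.uk", "net.uk",
   "co.jp", "or.jp", "ne.jp", "ac.jp", "go.jp",
   "com.au", "net.au", "org.au", "edu.au", "gov.au",
   "co.nz", "net.nz", "org.nz",
   "co.in", "net.in", "org.in", "gen.in", "firm.in", "ind.in",
   "co.za", "org.za", "web.za",
   "com.br", "net.br", "org.br",
   "com.cn", "net.cn", "org.cn",
   "com.mx", "net.mx", "org.mx",
   "co.kr", "or.kr", "ne.kr",
   "com.tw", "net.tw", "org.tw",
   "co.il", "org.il", "net.il",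
   "com.sg", "net.sg", "org.sg",
   "com.hk", "net.hk", "org.hk",
   "co.th", "or.th", "in.th",
   "com.my", "net.my", "org.my",
   "com.ph", "net.ph", "org.ph",
   "com.ar", "net.ar", "org.ar",
   "com.co", "net.co", "org.co"]

-- A's `for i in range(len(parts))` with two `break`s, as recursion on the index
def domainVariantsLoop (parts : List String) (i : Nat) : List String :=
  if i < parts.length then
    let remaining := PySem.List.slice parts (some (i : Int)) none    -- parts[i:]
    let candidate := PySem.Str.join "." remaining                    -- ".".join(parts[i:])
    if remaining.length ≤ 1 then []
    else if candidate ∈ twoPartTlds then []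
    else candidate :: domainVariantsLoop parts (i + 1)
  else []
termination_by parts.length - i

def domain_variants_py (domain : String) : List String :=
  let parts := (PySem.Str.split? domain ".").getD []   -- sep "." ≠ "", so split? is always `some`
  domainVariantsLoop parts 0

-- ===== PORT B =====
-- B's `for p in reversed(parts): acc = p if acc is None else p + "." + acc; suffixes.append(acc)`
def buildSuffixes : List String → Option String → List String → List String
  | [], _, suffixes => suffixes
  | p :: rest, acc, suffixes =>
      let acc' := match acc with
        | none => p
        | some a => p ++ "." ++ a
      buildSuffixes rest (some acc') (suffixes ++ [acc'])

def domain_variants_py_alt (domain : String) : List String :=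
  let parts := (PySem.Str.split? domain ".").getD []
  let suffixes := buildSuffixes parts.reverse none []
  -- keep = 2 if len(suffixes) >= 2 and suffixes[1] in TWO_PART_TLDS else 1
  let keep : Nat :=
    if 2 ≤ suffixes.length ∧ (PySem.List.pyGet? suffixes 1).getD "" ∈ twoPartTlds then 2 else 1
  -- suffixes[keep:][::-1]
  (PySem.List.slice suffixes (some (keep : Int)) none).reverse

-- ===== PRECONDITION & SPEC =====
def Spec_domain_variants_py (domain : String) (out : List String) : Prop := out = domain_variants_py_alt domain
instance (domain : String) (out : List String) : Decidable (Spec_domain_variants_py domain out) := by unfold Spec_domain_variants_py; infer_instance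

-- ===== CLAIM (what is proved, stated in full; the proofs are below) =====
def Claim_equal_domain_variants_py : Prop := ∀ (domain : String), Dom_domain_variants_py domain → Spec_domain_variants_py domain (domain_variants_py domain)

-- ===== LEMMAS AND PROOFS =====

-- every string in the TLD table contains exactly one '.'
lemma tld_count_dot : ∀ s ∈ twoPartTlds, s.toList.count '.' = 1 := by decide

-- a "."-join of (q.length + 1) pieces contains at least q.length dots
lemma join_count_dot_ge (p : List Char) (q : List (List Char)) :
    q.length ≤ (PySem.Chars.join ['.'] (p :: q)).count '.' := by
  induction q generalizing p with
  | nil => simp [PySem.Chars.join_singleton]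
  | cons b rest ih =>
    rw [PySem.Chars.join_cons_cons]
    have := ih b
    simp only [List.count_append, List.length_cons]
    have h1 : List.count '.' ['.'] = 1 := by decide
    omega

-- the cutoff both programs realise: keep all suffixes of ≥ 2 labels, ≥ 3 if the 2-label one is a TLD
def pvCut (parts : List String) : Nat :=
  parts.length -
    (if PySem.Str.join "." (parts.drop (parts.length - 2)) ∈ twoPartTlds then 2 else 1)

-- a join of ≥ 3 labels is never in the TLD table
lemma not_tld_of_long (l : List String) (h3 : 3 ≤ l.length) :
    PySem.Str.join "." l ∉ twoPartTlds := by
  intro hmem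
  have hc1 := tld_count_dot _ hmem
  match l, h3 with
  | p :: q, h3 =>
    have hge := join_count_dot_ge p.toList (q.map String.toList)
    have hdot : ("." : String).toList = ['.'] := by decide
    rw [PySem.Str.toList_join, hdot] at hc1
    simp only [List.map_cons] at hc1
    simp only [List.length_map] at hge
    simp only [List.length_cons] at h3
    omega

-- A's loop, from index i, emits exactly the suffixes with start index in [i, pvCut parts)
lemma loop_eq (parts : List String) (i : Nat) :
    domainVariantsLoop parts i =
      (List.range' i (pvCut parts - i)).map
        (fun j => PySem.Str.join "." (parts.drop j)) := by
  by_cases hi : i < parts.length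
  · rw [domainVariantsLoop]
    simp only [hi, if_true]
    rw [PySem.List.slice_from_natCast]
    have hlen : (parts.drop i).length = parts.length - i := by simp
    by_cases h1 : (parts.drop i).length ≤ 1
    · simp only [h1, if_true]
      rw [hlen] at h1
      have : pvCut parts - i = 0 := by unfold pvCut; split <;> omega
      simp [this]
    · simp only [h1, if_false]
      by_cases htld : PySem.Str.join "." (parts.drop i) ∈ twoPartTlds
      · simp only [htld, if_true]
        have h3 : ¬ 3 ≤ (parts.drop i).length := by
          intro h; exact not_tld_of_long _ h htld
        have hi2 : i = parts.length - 2 := by omega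
        have hflag : PySem.Str.join "." (parts.drop (parts.length - 2)) ∈ twoPartTlds := by
          rw [← hi2]; exact htld
        have : pvCut parts - i = 0 := by unfold pvCut; rw [if_pos hflag]; omega
        simp [this]
      · simp only [htld, if_false]
        have ih := loop_eq parts (i + 1)
        rw [ih]
        have hic : i < pvCut parts := by
          unfold pvCut
          split
          · rename_i hflag
            have : i ≠ parts.length - 2 := by
              intro he; exact htld (he ▸ hflag)
            omega
          · omega
        have hstep : pvCut parts - i = (pvCut parts - (i + 1)) + 1 := by omega
        rw [hstep, List.range'_succ]
        simp
  · rw [domainVariantsLoop]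
    simp only [hi, if_false]
    have hcle : pvCut parts ≤ parts.length := by unfold pvCut; split <;> omega
    have : pvCut parts - i = 0 := by omega
    simp [this]
termination_by parts.length - i

-- String-level join: prepending a label is one concatenation
lemma join_cons (p : String) (s : List String) (hs : s ≠ []) :
    p ++ "." ++ PySem.Str.join "." s = PySem.Str.join "." (p :: s) := by
  match s, hs with
  | b :: r, _ =>
    apply String.ext
    simp [PySem.Str.toList_join, PySem.Chars.join_cons_cons]

-- B's fold with a some-accumulator: emits the joins of growing reversed prefixes glued onto s
lemma buildSuffixes_some (r : List String) :
    ∀ (s suffixes : List String), s ≠ [] →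
      buildSuffixes r (some (PySem.Str.join "." s)) suffixes =
        suffixes ++ (List.range r.length).map
          (fun i => PySem.Str.join "." ((r.take (i + 1)).reverse ++ s)) := by
  induction r with
  | nil => intro s suffixes _; simp [buildSuffixes]
  | cons p rest ih =>
    intro s suffixes hs
    simp only [buildSuffixes]
    rw [join_cons p s hs]
    rw [ih (p :: s) _ (by simp)]
    simp only [List.length_cons]
    rw [List.range_succ_eq_map]
    simp [List.map_map, Function.comp, List.append_assoc]

-- the suffix list B builds, characterised by drop indices (shortest suffix first)
lemma suffixes_eq (parts : List String) (h : parts ≠ []) :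
    buildSuffixes parts.reverse none [] =
      (List.range parts.length).map
        (fun k => PySem.Str.join "." (parts.drop (parts.length - (k + 1)))) := by
  obtain ⟨q, t, hqt⟩ : ∃ q t, parts.reverse = q :: t := by
    cases hr : parts.reverse with
    | nil => exact absurd (by simpa using congrArg List.reverse hr) h
    | cons q t => exact ⟨q, t, rfl⟩
  have hparts : parts = t.reverse ++ [q] := by
    have := congrArg List.reverse hqt
    simpa using this
  rw [hqt]
  simp only [buildSuffixes]
  have hq : q = PySem.Str.join "." [q] := by
    apply String.ext
    simp [PySem.Str.toList_join, PySem.Chars.join_singleton]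
  rw [hq, buildSuffixes_some t [q] _ (by simp)]
  subst hparts
  have hn : (t.reverse ++ [q]).length = t.length + 1 := by simp
  rw [hn, List.range_succ_eq_map, List.map_cons, List.nil_append, List.singleton_append]
  congr 1
  · rw [show t.length + 1 - (0 + 1) = t.reverse.length by simp, List.drop_left, ← hq]
  · rw [List.map_map]
    apply List.map_congr_left
    intro i hi
    simp only [Function.comp_apply, List.mem_range] at *
    congr 1
    have h1 : t.length + 1 - (i + 1 + 1) = t.reverse.length - (i + 1) := by
      simp only [List.length_reverse]; omega
    rw [h1, List.drop_append_of_le_length (by simp)]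
    congr 1
    rw [List.drop_reverse]
    have h2 : t.length - (t.reverse.length - (i + 1)) = i + 1 := by
      simp only [List.length_reverse]; omega
    rw [h2]

-- reversing the kept tail of the shortest-first list yields the longest-first ascending-drop map
lemma drop_map_range_reverse {α : Type} (n keep : Nat) (g : Nat → α) :
    ((((List.range n).map (fun k => g (n - (k + 1)))).drop keep)).reverse =
      (List.range (n - keep)).map g := by
  apply List.ext_getElem
  · simp
  · intro j h1 h2
    simp only [List.getElem_reverse, List.getElem_drop, List.getElem_map, List.getElem_range,
      List.length_reverse, List.length_drop, List.length_map, List.length_range] at h1 h2 ⊢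
    congr 1
    omega

-- the previous lemma, specialised to B's suffix joins (beta-reduced instance)
lemma drop_map_range_reverse' (parts : List String) (keep : Nat) :
    ((((List.range parts.length).map
        (fun k => PySem.Str.join "." (parts.drop (parts.length - (k + 1))))).drop keep)).reverse =
      (List.range (parts.length - keep)).map (fun j => PySem.Str.join "." (parts.drop j)) :=
  drop_map_range_reverse parts.length keep (fun j => PySem.Str.join "." (parts.drop j))

-- B's keep and A's cutoff agree: n - keep = pvCut parts
lemma cut_eq (parts : List String) :
    pvCut parts = parts.length -
      (if 2 ≤ ((List.range parts.length).map
            (fun k => PySem.Str.join "." (parts.drop (parts.length - (k + 1))))).length ∧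
          (PySem.List.pyGet? ((List.range parts.length).map
            (fun k => PySem.Str.join "." (parts.drop (parts.length - (k + 1))))) 1).getD ""
            ∈ twoPartTlds
        then 2 else 1) := by
  set n := parts.length with hn
  set xs := (List.range n).map
      (fun k => PySem.Str.join "." (parts.drop (n - (k + 1)))) with hxs
  have hlen : xs.length = n := by rw [hxs]; simp
  by_cases h2 : 2 ≤ n
  · have hone : (1 : Int) = ((1 : Nat) : Int) := by norm_num
    have hget : PySem.List.pyGet? xs 1 = some (PySem.Str.join "." (parts.drop (n - 2))) := by
      rw [hone, PySem.List.pyGet?_natCast, hxs,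
          List.getElem?_eq_getElem (by simp; omega)]
      simp
    rw [hget]
    simp only [Option.getD_some, hlen]
    by_cases htld : PySem.Str.join "." (parts.drop (n - 2)) ∈ twoPartTlds
    · rw [if_pos ⟨h2, htld⟩]; unfold pvCut; rw [← hn, if_pos htld]
    · rw [if_neg (by tauto)]; unfold pvCut; rw [← hn, if_neg htld]
  · have hcle : pvCut parts = 0 := by unfold pvCut; rw [← hn]; split <;> omega
    rw [hcle]
    split <;> omega

-- ===== VERDICT (by name: the statement is the Claim_ definition above) =====
theorem domain_variants_py_spec : Claim_equal_domain_variants_py := by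
  intro domain _
  show domain_variants_py domain = domain_variants_py_alt domain
  simp only [domain_variants_py, domain_variants_py_alt]
  set parts := (PySem.Str.split? domain ".").getD [] with hp
  by_cases hne : parts = []
  · rw [hne]
    simp [domainVariantsLoop, buildSuffixes, PySem.List.slice]
  · rw [loop_eq parts 0, suffixes_eq parts hne, PySem.List.slice_from_natCast,
        drop_map_range_reverse', Nat.sub_zero, ← cut_eq, List.range_eq_range']
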